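-- pv_equiv track=rewrite | github.com/Saravanan-Delloite/Python_track | MAINASSIGNMENT/adminOp.py | showPossible
-- ===== SOURCE A (Python) =====
-- def showPossible(lst,len,first):
--     Interval = lst[9]
--     ShowGap = lst[10]
--     NumberOfShows = lst[7]
--     sum = first
--     TotalTimeForShow = len + Interval + ShowGap
--     for i in range(NumberOfShows-1):
--         sum = sum+TotalTimeForShow
--     sum = sum+len+Interval
--     if sum <= 1440:
--         return len+Interval
--     else:
--         num = 0
--         return num
-- ===== SOURCE B (Python) =====
-- def showPossible(lst, len, first):
--     Interval = lst[9]
--     ShowGap = lst[10]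
--     NumberOfShows = lst[7]
--     total = first + (len + Interval + ShowGap) * max(0, NumberOfShows - 1) + len + Interval
--     return len + Interval if total <= 1440 else 0
-- ===== Notes on version B (the rewrite author's own statement) =====
-- stated objective: simpler
-- what changed: Replaces the O(NumberOfShows) accumulation loop with the closed form first + TotalTimeForShow*max(0, n-1) + len + Interval.
import Mathlib
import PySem

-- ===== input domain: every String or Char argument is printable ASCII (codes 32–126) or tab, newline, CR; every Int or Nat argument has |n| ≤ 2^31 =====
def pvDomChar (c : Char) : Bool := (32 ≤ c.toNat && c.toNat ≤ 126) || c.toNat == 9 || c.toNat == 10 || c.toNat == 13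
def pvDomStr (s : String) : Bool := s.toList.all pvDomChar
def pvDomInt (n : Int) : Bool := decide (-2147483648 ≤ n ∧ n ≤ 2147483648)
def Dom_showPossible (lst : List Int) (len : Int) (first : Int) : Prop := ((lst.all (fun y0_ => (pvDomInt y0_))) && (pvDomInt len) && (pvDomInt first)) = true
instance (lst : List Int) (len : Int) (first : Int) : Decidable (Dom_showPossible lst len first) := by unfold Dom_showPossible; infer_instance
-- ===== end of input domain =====

-- B replaces A's accumulation loop by a closed-form arithmetic expression (objective: simpler).

-- ===== PORT A =====
def showPossible (lst : List Int) (len : Int) (first : Int) : Int :=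
  match PySem.List.pyGet? lst 9, PySem.List.pyGet? lst 10, PySem.List.pyGet? lst 7 with
  | some interval, some showGap, some numberOfShows =>
    let sum := first
    let totalTimeForShow := len + interval + showGap
    let sum := (PySem.List.pyRange 0 (numberOfShows - 1) 1).foldl (fun acc _ => acc + totalTimeForShow) sum
    let sum := sum + len + interval
    if sum ≤ 1440 then len + interval else 0
  | _, _, _ => 0  -- unreachable under Pre_ (Python raises IndexError)

-- ===== PORT B =====
def showPossible_alt (lst : List Int) (len : Int) (first : Int) : Int :=
  let interval := (PySem.List.pyGet? lst 9).getD 0    -- in range under Pre_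
  let showGap := (PySem.List.pyGet? lst 10).getD 0
  let n := (PySem.List.pyGet? lst 7).getD 0
  let total := first + (len + interval + showGap) * max 0 (n - 1) + len + interval
  if total ≤ 1440 then len + interval else 0

-- ===== PRECONDITION & SPEC =====
-- Pre_: the Python indexes lst[9], lst[10], lst[7], so it raises IndexError unless len(lst) ≥ 11.
def Pre_showPossible (lst : List Int) (_len : Int) (_first : Int) : Prop := 11 ≤ lst.length
instance (lst : List Int) (len : Int) (first : Int) : Decidable (Pre_showPossible lst len first) := by unfold Pre_showPossible; infer_instance
def pvWitness_showPossible : List Int × Int × Int := ([0,0,0,0,0,0,0,3,0,10,5], 30, 60)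

def Spec_showPossible (lst : List Int) (len : Int) (first : Int) (out : Int) : Prop := out = showPossible_alt lst len first
instance (lst : List Int) (len : Int) (first : Int) (out : Int) : Decidable (Spec_showPossible lst len first out) := by unfold Spec_showPossible; infer_instance

-- ===== CLAIM (what is proved, stated in full; the proofs are below) =====
def Claim_equal_showPossible : Prop := ∀ (lst : List Int) (len : Int) (first : Int), Dom_showPossible lst len first → Pre_showPossible lst len first → Spec_showPossible lst len first (showPossible lst len first)

-- ===== LEMMAS AND PROOFS =====
theorem foldl_const_add (l : List Int) (c s : Int) :
    l.foldl (fun acc _ => acc + c) s = s + c * l.length := by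
  induction l generalizing s with
  | nil => simp
  | cons x xs ih => simp [List.foldl, ih]; ring

-- ===== VERDICT (by name: the statement is the Claim_ definition above) =====
theorem showPossible_spec : Claim_equal_showPossible := by
  intro lst len first _ hpre
  have hpre' : 11 ≤ lst.length := hpre
  have h9 : PySem.List.pyGet? lst 9 = some (lst[(9:Nat)]'(by omega)) := by
    simpa using PySem.List.pyGet?_ofNat lst 9 (by omega)
  have h10 : PySem.List.pyGet? lst 10 = some (lst[(10:Nat)]'(by omega)) := by
    simpa using PySem.List.pyGet?_ofNat lst 10 (by omega)
  have h7 : PySem.List.pyGet? lst 7 = some (lst[(7:Nat)]'(by omega)) := by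
    simpa using PySem.List.pyGet?_ofNat lst 7 (by omega)
  unfold Spec_showPossible showPossible showPossible_alt
  rw [h9, h10, h7]
  simp only [Option.getD_some, foldl_const_add, PySem.List.length_pyRange_one]
  have : ((lst[(7:Nat)]'(by omega) - 1 - 0).toNat : Int) = max 0 (lst[(7:Nat)]'(by omega) - 1) := by omega
  rw [this]
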